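-- pv_equiv track=rewrite | github.com/Amxn-2/cyber-feed | python-scraper/src/services/enrichment_service.py | _tag_sectors
-- ===== SOURCE A (Python) =====
-- def _tag_sectors(text, entities):
--     """Identify which sectors are affected based on text and entities"""
--     text = text.lower()
--     sectors = []
--
--     sector_map = {
--         "Banking & Finance": ['bank', 'finance', 'payment', 'atm', 'transaction', 'sbi', 'rbi', 'hdfc', 'icici'],
--         "Healthcare": ['hospital', 'medical', 'healthcare', 'patient', 'pharmaceutical', 'aiims'],
--         "Government": ['government', 'ministry', 'govt', 'public sector', 'nic', 'police', 'defense'],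
--         "Technology": ['software', 'it', 'cloud', 'service provider', 'tech', 'saas', 'google', 'microsoft'],
--         "Critical Infrastructure": ['power', 'grid', 'water', 'energy', 'transportation', 'railway', 'airport'],
--         "E-commerce": ['retail', 'shopping', 'ecommerce', 'amazon', 'flipkart', 'order', 'customer']
--     }
--
--     # Check organizations first as they are strong indicators
--     orgs = [o.lower() for o in entities.get('organizations', [])]
--
--     for sector, keywords in sector_map.items():
--         # Check keywords in text
--         if any(keyword in text for keyword in keywords):
--             sectors.append(sector)
--             continue
--
--         # Check keywords in organizations
--         if any(keyword in org for org in orgs for keyword in keywords):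
--             if sector not in sectors:
--                 sectors.append(sector)
--
--     return sectors
-- ===== SOURCE B (Python) =====
-- def _tag_sectors(text, entities):
--     """Identify which sectors are affected based on text and entities"""
--     sector_map = {
--         "Banking & Finance": ['bank', 'finance', 'payment', 'atm', 'transaction', 'sbi', 'rbi', 'hdfc', 'icici'],
--         "Healthcare": ['hospital', 'medical', 'healthcare', 'patient', 'pharmaceutical', 'aiims'],
--         "Government": ['government', 'ministry', 'govt', 'public sector', 'nic', 'police', 'defense'],
--         "Technology": ['software', 'it', 'cloud', 'service provider', 'tech', 'saas', 'google', 'microsoft'],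
--         "Critical Infrastructure": ['power', 'grid', 'water', 'energy', 'transportation', 'railway', 'airport'],
--         "E-commerce": ['retail', 'shopping', 'ecommerce', 'amazon', 'flipkart', 'order', 'customer']
--     }
--
--     # Reverse index: keyword -> sector (keywords are unique across sectors)
--     kw_to_sector = {}
--     for sector, keywords in sector_map.items():
--         for kw in keywords:
--             kw_to_sector[kw] = sector
--
--     # One list of haystacks: the lowered text plus each lowered organization
--     haystacks = [text.lower()] + [o.lower() for o in entities.get('organizations', [])]
--
--     hit = set()
--     for hay in haystacks:
--         for kw, sector in kw_to_sector.items():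
--             if kw in hay:
--                 hit.add(sector)
--
--     return [s for s in sector_map if s in hit]
-- ===== Notes on version B (the rewrite author's own statement) =====
-- stated objective: alternative
-- what changed: Replaces the per-sector scan with its dead 'sector not in sectors' re-check by a reverse keyword-to-sector index scanned once per haystack into a hit set, then emits sector_map keys filtered by that set.
import Mathlib
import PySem

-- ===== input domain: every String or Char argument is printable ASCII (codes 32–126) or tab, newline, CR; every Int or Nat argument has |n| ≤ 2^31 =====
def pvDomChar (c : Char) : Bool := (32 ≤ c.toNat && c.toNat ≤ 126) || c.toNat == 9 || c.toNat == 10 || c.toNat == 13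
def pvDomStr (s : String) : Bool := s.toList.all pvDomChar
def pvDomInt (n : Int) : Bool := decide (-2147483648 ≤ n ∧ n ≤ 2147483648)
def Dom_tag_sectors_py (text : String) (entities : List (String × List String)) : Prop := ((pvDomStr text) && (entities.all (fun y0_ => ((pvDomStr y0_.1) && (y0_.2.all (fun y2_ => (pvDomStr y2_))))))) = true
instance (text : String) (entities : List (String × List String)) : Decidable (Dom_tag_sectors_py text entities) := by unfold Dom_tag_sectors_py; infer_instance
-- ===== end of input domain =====

-- B replaces A's per-sector keyword scan (and its dead "sector not in sectors" re-check) by a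
-- reverse keyword→sector index scanned once per haystack into a hit set, then emits the
-- sector_map keys filtered by that set; same cost, different structure (objective: alternative).

-- the sector→keywords table both Python versions write out literally
def pvSectorMap : List (String × List String) :=
  [("Banking & Finance", ["bank","finance","payment","atm","transaction","sbi","rbi","hdfc","icici"]),
   ("Healthcare", ["hospital","medical","healthcare","patient","pharmaceutical","aiims"]),
   ("Government", ["government","ministry","govt","public sector","nic","police","defense"]),
   ("Technology", ["software","it","cloud","service provider","tech","saas","google","microsoft"]),
   ("Critical Infrastructure", ["power","grid","water","energy","transportation","railway","airport"]),
   ("E-commerce", ["retail","shopping","ecommerce","amazon","flipkart","order","customer"])]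

-- ===== PORT A =====
def tag_sectors_py (text : String) (entities : List (String × List String)) : List String :=
  let t := PySem.Str.lower text
  let orgs := (PySem.Dict.getD (PySem.Dict.mk entities) "organizations" []).map PySem.Str.lower
  pvSectorMap.foldl (fun sectors p =>
    if p.2.any (fun kw => PySem.Str.isIn kw t) then sectors ++ [p.1]
    else if orgs.any (fun org => p.2.any (fun kw => PySem.Str.isIn kw org)) then
      (if sectors.contains p.1 then sectors else sectors ++ [p.1])
    else sectors) []

-- ===== PORT B =====
def tag_sectors_py_alt (text : String) (entities : List (String × List String)) : List String :=
  let kwToSector : PySem.Dict String String :=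
    pvSectorMap.foldl (fun d p => p.2.foldl (fun d kw => PySem.Dict.insert d kw p.1) d) PySem.Dict.empty
  let haystacks := [PySem.Str.lower text] ++
    (PySem.Dict.getD (PySem.Dict.mk entities) "organizations" []).map PySem.Str.lower
  let hit : PySem.Set String := haystacks.foldl (fun s hay =>
    kwToSector.items.foldl (fun s q => if PySem.Str.isIn q.1 hay then PySem.Set.add s q.2 else s) s)
    PySem.Set.empty
  (pvSectorMap.map (·.1)).filter (fun s => PySem.Set.contains hit s)

-- ===== PRECONDITION & SPEC =====
def Spec_tag_sectors_py (text : String) (entities : List (String × List String)) (out : List String) : Prop := out = tag_sectors_py_alt text entities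
instance (text : String) (entities : List (String × List String)) (out : List String) : Decidable (Spec_tag_sectors_py text entities out) := by unfold Spec_tag_sectors_py; infer_instance

-- ===== CLAIM (what is proved, stated in full; the proofs are below) =====
def Claim_equal_tag_sectors_py : Prop := ∀ (text : String) (entities : List (String × List String)), Dom_tag_sectors_py text entities → Spec_tag_sectors_py text entities (tag_sectors_py text entities)

-- ===== LEMMAS AND PROOFS =====

-- membership after B's inner loop over the keyword index for one haystack
theorem pv_hit_mem_inner (hay : String) (KW : List (String × String)) :
    ∀ (s : PySem.Set String) (x : String),
      (x ∈ KW.foldl (fun s q => if PySem.Str.isIn q.1 hay then PySem.Set.add s q.2 else s) s)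
      ↔ x ∈ s ∨ ∃ q ∈ KW, PySem.Str.isIn q.1 hay = true ∧ q.2 = x := by
  induction KW with
  | nil => simp [List.foldl]
  | cons q ks ih =>
    intro s x
    simp only [List.foldl_cons]
    by_cases h : PySem.Str.isIn q.1 hay = true
    · rw [if_pos h, ih]
      simp [PySem.Set.mem_add]
      tauto
    · rw [if_neg h, ih]
      simp
      tauto

-- membership in the hit set built by B's double loop over haystacks × keyword index
theorem pv_hit_mem (KW : List (String × String)) :
    ∀ (hays : List String) (s : PySem.Set String) (x : String),
      (x ∈ hays.foldl (fun s hay =>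
        KW.foldl (fun s q => if PySem.Str.isIn q.1 hay then PySem.Set.add s q.2 else s) s) s)
      ↔ x ∈ s ∨ ∃ h ∈ hays, ∃ q ∈ KW, PySem.Str.isIn q.1 h = true ∧ q.2 = x := by
  intro hays
  induction hays with
  | nil => simp [List.foldl]
  | cons hay hs ih =>
    intro s x
    simp only [List.foldl_cons]
    rw [ih, pv_hit_mem_inner]
    simp [or_assoc]

-- A's fold appends each sector whose keywords hit the text or an org; since the pending sector
-- name is never already in the accumulator, the dead 'contains' branch collapses and the fold is
-- a filter-then-map.
theorem pv_A_fold (t : String) (orgs : List String) :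
    ∀ (l : List (String × List String)) (acc : List String),
      l.Pairwise (fun p q => p.1 ≠ q.1) →
      (∀ p ∈ l, acc.contains p.1 = false) →
      l.foldl (fun sectors p =>
        if p.2.any (fun kw => PySem.Str.isIn kw t) then sectors ++ [p.1]
        else if orgs.any (fun org => p.2.any (fun kw => PySem.Str.isIn kw org)) then
          (if sectors.contains p.1 then sectors else sectors ++ [p.1])
        else sectors) acc
      = acc ++ ((l.filter (fun p => (t :: orgs).any (fun h => p.2.any (fun kw => PySem.Str.isIn kw h)))).map (·.1)) := by
  intro l
  induction l with
  | nil => simp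
  | cons p ps ih =>
    intro acc hpw hacc
    have hpw' := (List.pairwise_cons.mp hpw)
    have hnotin : acc.contains p.1 = false := hacc p (by simp)
    have hinv : ∀ q ∈ ps, (acc ++ [p.1]).contains q.1 = false := by
      intro q hq
      have h1' := hacc q (List.mem_cons_of_mem _ hq)
      have hne := hpw'.1 q hq
      simp only [List.contains_eq_mem, decide_eq_false_iff_not] at h1' ⊢
      simp only [List.mem_append, List.mem_singleton]
      rintro (h | h)
      · exact h1' h
      · exact hne h.symm
    simp only [List.foldl_cons, List.filter_cons]
    by_cases h1 : p.2.any (fun kw => PySem.Str.isIn kw t) = true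
    · have hc : ((t :: orgs).any fun h => p.2.any fun kw => PySem.Str.isIn kw h) = true := by
        simp only [List.any_cons, h1, Bool.true_or]
      rw [if_pos h1, ih (acc ++ [p.1]) hpw'.2 hinv, hc]
      simp
    · rw [if_neg h1]
      by_cases h2 : (orgs.any fun org => p.2.any fun kw => PySem.Str.isIn kw org) = true
      · have hc : ((t :: orgs).any fun h => p.2.any fun kw => PySem.Str.isIn kw h) = true := by
          simp only [List.any_cons, h1, h2, Bool.or_true]
        rw [if_pos h2, if_neg (by simp only [hnotin]; exact Bool.false_ne_true),
          ih (acc ++ [p.1]) hpw'.2 hinv, hc]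
        simp
      · simp only [Bool.not_eq_true] at h1 h2
        have hc : ((t :: orgs).any fun h => p.2.any fun kw => PySem.Str.isIn kw h) = false := by
          rw [List.any_cons, h1, h2]; rfl
        rw [if_neg (by simp only [h2]; exact Bool.false_ne_true),
          ih acc hpw'.2 (fun q hq => hacc q (List.mem_cons_of_mem _ hq)), hc]
        simp

-- the six sector names are pairwise distinct
theorem pv_names_nodup : pvSectorMap.Pairwise (fun p q => p.1 ≠ q.1) := by decide

-- the reverse index's entries mapping to a sector are exactly that sector's keyword list
set_option maxRecDepth 10000 in
theorem pv_kw_filter : ∀ p ∈ pvSectorMap,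
    (((pvSectorMap.foldl (fun d p => p.2.foldl (fun d kw => PySem.Dict.insert d kw p.1) d)
        PySem.Dict.empty).items.filter (fun q => q.2 == p.1)).map (·.1)) = p.2 := by decide

theorem pv_main (text : String) (entities : List (String × List String)) :
    tag_sectors_py text entities = tag_sectors_py_alt text entities := by
  unfold tag_sectors_py tag_sectors_py_alt
  set t := PySem.Str.lower text with ht
  set orgs := (PySem.Dict.getD (PySem.Dict.mk entities) "organizations" []).map PySem.Str.lower with horgs
  set KW := (pvSectorMap.foldl (fun d p => p.2.foldl (fun d kw => PySem.Dict.insert d kw p.1) d)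
      PySem.Dict.empty).items with hKW
  rw [pv_A_fold t orgs pvSectorMap [] pv_names_nodup (by simp)]
  rw [List.nil_append, List.filter_map]
  apply congrArg
  apply List.filter_congr
  intro p hp
  have hfilt := pv_kw_filter p hp
  rw [← hKW] at hfilt
  have hmem := pv_hit_mem KW (t :: orgs) PySem.Set.empty p.1
  simp only [Function.comp, List.cons_append, List.nil_append]
  rw [Bool.eq_iff_iff, PySem.Set.contains_iff, ← hKW, hmem]
  simp only [PySem.Set.empty, List.not_mem_nil, false_or]
  rw [List.any_eq_true]
  constructor
  · rintro ⟨h, hh, hkw⟩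
    refine ⟨h, hh, ?_⟩
    rw [← hfilt, List.any_map, List.any_filter, List.any_eq_true] at hkw
    obtain ⟨q, hq, hcond⟩ := hkw
    simp only [Bool.and_eq_true, beq_iff_eq] at hcond
    exact ⟨q, hq, hcond.2, hcond.1⟩
  · rintro ⟨h, hh, q, hq, hin, hqp⟩
    refine ⟨h, hh, ?_⟩
    rw [← hfilt, List.any_map, List.any_filter, List.any_eq_true]
    exact ⟨q, hq, by simp only [hqp, beq_self_eq_true, Bool.true_and]; simpa using hin⟩

-- ===== VERDICT (by name: the statement is the Claim_ definition above) =====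
theorem tag_sectors_py_spec : Claim_equal_tag_sectors_py := by
  intro text entities _
  exact pv_main text entities
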